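-- pv_equiv track=rewrite | github.com/sashidziner-AI/SyllabusIQ | mcq_generator.py | enforce_pc_question_count
-- ===== SOURCE A (Python) =====
-- def enforce_pc_question_count(rows: list[dict[str, str]], has_nos: bool) -> list[dict[str, str]]:
--     field = "Performance Criteria (PC)"
--     grouped: dict[str, list[dict[str, str]]] = {}
--     for row in rows:
--         grouped.setdefault(row[field], []).append(row)
--
--     filtered: list[dict[str, str]] = []
--     for _, group in grouped.items():
--         # enforce max 5; include only PCs with at least 3 candidates
--         if len(group) < 3:
--             continue
--         filtered.extend(group[:5])
--     return filtered
-- ===== SOURCE B (Python) =====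
-- def enforce_pc_question_count(rows: list[dict[str, str]], has_nos: bool) -> list[dict[str, str]]:
--     field = "Performance Criteria (PC)"
--     keys = list(dict.fromkeys(row[field] for row in rows))
--     out: list[dict[str, str]] = []
--     for key in keys:
--         members = [r for r in rows if r[field] == key]
--         if len(members) >= 3:
--             out.extend(members[:5])
--     return out
-- ===== Notes on version B (the rewrite author's own statement) =====
-- stated objective: alternative
-- what changed: Instead of building a key-to-group index dict in one pass, B first collects the distinct PC keys in first-appearance order (dict.fromkeys) and then re-scans the full rows list once per key to rebuild each group before applying the >=3 filter and [:5] cap.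
import Mathlib
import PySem

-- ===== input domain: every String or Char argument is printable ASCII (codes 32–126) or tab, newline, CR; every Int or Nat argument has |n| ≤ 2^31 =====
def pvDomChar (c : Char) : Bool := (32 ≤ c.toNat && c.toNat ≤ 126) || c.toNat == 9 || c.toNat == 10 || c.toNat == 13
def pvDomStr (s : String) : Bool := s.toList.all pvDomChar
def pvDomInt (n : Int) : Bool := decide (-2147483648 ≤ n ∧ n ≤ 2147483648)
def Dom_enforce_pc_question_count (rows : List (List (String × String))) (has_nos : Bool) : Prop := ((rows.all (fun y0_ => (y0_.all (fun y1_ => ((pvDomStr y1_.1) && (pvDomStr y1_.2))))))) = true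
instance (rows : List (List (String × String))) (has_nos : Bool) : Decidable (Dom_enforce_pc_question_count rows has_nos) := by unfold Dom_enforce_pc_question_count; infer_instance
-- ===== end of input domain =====

-- B rebuilds each group by re-scanning rows once per distinct key instead of A's single
-- grouping dict pass; equal output (same key order, member order, >=3 filter, [:5] cap).

-- row[field]: first-match lookup; Pre_ guarantees isSome, so the '.getD ""' default is never used
def pcKey (row : List (String × String)) : String :=
  ((PySem.Dict.mk row).get? "Performance Criteria (PC)").getD ""

-- ===== PORT A =====
def enforce_pc_question_count (rows : List (List (String × String))) (has_nos : Bool) : List (List (String × String)) :=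
  let grouped : PySem.Dict String (List (List (String × String))) :=
    rows.foldl (fun d row => d.modify (pcKey row) [] (· ++ [row])) PySem.Dict.empty
  grouped.items.foldl
    (fun filtered kg => if kg.2.length < 3 then filtered else filtered ++ kg.2.take 5) []

-- ===== PORT B =====
def enforce_pc_question_count_alt (rows : List (List (String × String))) (has_nos : Bool) : List (List (String × String)) :=
  let keys : List String := PySem.Set.ofList (rows.map pcKey)
  keys.foldl
    (fun out key =>
      let members := rows.filter (fun r => pcKey r == key)
      if 3 ≤ members.length then out ++ members.take 5 else out) []

-- ===== PRECONDITION & SPEC =====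
-- Pre_ excludes exactly the inputs where Python A raises KeyError: a row lacking the PC field
-- (B raises there too).
def Pre_enforce_pc_question_count (rows : List (List (String × String))) (has_nos : Bool) : Prop :=
  ∀ row ∈ rows, ((PySem.Dict.mk row).get? "Performance Criteria (PC)").isSome = true
instance (rows : List (List (String × String))) (has_nos : Bool) : Decidable (Pre_enforce_pc_question_count rows has_nos) := by unfold Pre_enforce_pc_question_count; infer_instance

def pvWitness_enforce_pc_question_count : (List (List (String × String))) × Bool :=
  ([[("Performance Criteria (PC)", "a"), ("Question", "q1")],
    [("Performance Criteria (PC)", "a"), ("Question", "q2")],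
    [("Performance Criteria (PC)", "a"), ("Question", "q3")],
    [("Performance Criteria (PC)", "b"), ("Question", "q4")]], true)

def Spec_enforce_pc_question_count (rows : List (List (String × String))) (has_nos : Bool) (out : List (List (String × String))) : Prop := out = enforce_pc_question_count_alt rows has_nos
instance (rows : List (List (String × String))) (has_nos : Bool) (out : List (List (String × String))) : Decidable (Spec_enforce_pc_question_count rows has_nos out) := by unfold Spec_enforce_pc_question_count; infer_instance

-- ===== CLAIM (what is proved, stated in full; the proofs are below) =====
def Claim_equal_enforce_pc_question_count : Prop := ∀ (rows : List (List (String × String))) (has_nos : Bool), Dom_enforce_pc_question_count rows has_nos → Pre_enforce_pc_question_count rows has_nos → Spec_enforce_pc_question_count rows has_nos (enforce_pc_question_count rows has_nos)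

-- ===== LEMMAS AND PROOFS =====

-- A's grouping dict, written as a fold over (key, row) pairs so the PySem grouping lemmas apply
theorem pv_grouped_eq (rows : List (List (String × String))) :
    rows.foldl (fun d row => d.modify (pcKey row) [] (· ++ [row]))
      (PySem.Dict.empty : PySem.Dict String (List (List (String × String)))) =
    (rows.map (fun r => (pcKey r, r))).foldl (fun d p => d.modify p.1 [] (· ++ [p.2]))
      PySem.Dict.empty := by
  rw [List.foldl_map]

theorem pv_keys_grouped (rows : List (List (String × String))) :
    (rows.foldl (fun d row => d.modify (pcKey row) [] (· ++ [row]))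
      (PySem.Dict.empty : PySem.Dict String (List (List (String × String))))).keys =
    PySem.Set.ofList (rows.map pcKey) := by
  rw [PySem.Dict.keys_foldl_modify_key]
  simp [PySem.Dict.keys_empty, PySem.Set.update_nil_left]

theorem pv_getD_grouped (rows : List (List (String × String))) (k : String) :
    (rows.foldl (fun d row => d.modify (pcKey row) [] (· ++ [row]))
      (PySem.Dict.empty : PySem.Dict String (List (List (String × String))))).getD k [] =
    rows.filter (fun r => pcKey r == k) := by
  rw [pv_grouped_eq, PySem.Dict.getD_foldl_modify_append]
  simp [PySem.Dict.getD_empty, List.filter_map, Function.comp_def]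

theorem pv_items_grouped (rows : List (List (String × String))) :
    (rows.foldl (fun d row => d.modify (pcKey row) [] (· ++ [row]))
      (PySem.Dict.empty : PySem.Dict String (List (List (String × String))))).items =
    (PySem.Set.ofList (rows.map pcKey)).map
      (fun k => (k, rows.filter (fun r => pcKey r == k))) := by
  rw [PySem.Dict.items_eq_map_keys _
        (PySem.Dict.nodup_keys_foldl_modify_key rows pcKey [] (fun _ row => (· ++ [row]))
          PySem.Dict.empty (by simp [PySem.Dict.keys_empty])) [],
      pv_keys_grouped]
  exact List.map_congr_left (fun k _ => by rw [pv_getD_grouped])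

-- ===== VERDICT (by name: the statement is the Claim_ definition above) =====
theorem enforce_pc_question_count_spec : Claim_equal_enforce_pc_question_count := by
  intro rows has_nos _ _
  unfold Spec_enforce_pc_question_count enforce_pc_question_count enforce_pc_question_count_alt
  dsimp only
  rw [pv_items_grouped, List.foldl_map]
  congr 1
  funext acc k
  by_cases h : (rows.filter (fun r => pcKey r == k)).length < 3 <;> simp [h]
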